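-- pv_equiv track=rewrite | github.com/Perdonus/sosiski | app/giveaway.py | _extract_schedule_for_date
-- ===== SOURCE A (Python) =====
-- from typing import Dict, List, Optional, Tuple
--
-- def _extract_schedule_for_date(
--     items: List[Dict[str, object]],
--     date_key: str,
-- ) -> Tuple[Optional[Dict[str, object]], List[Dict[str, object]]]:
--     match = None
--     rest: List[Dict[str, object]] = []
--     for item in items:
--         if match is None and item.get("date") == date_key:
--             match = item
--         else:
--             rest.append(item)
--     return match, rest
-- ===== SOURCE B (Python) =====
-- from typing import Dict, List, Optional, Tuple
--
-- def _extract_schedule_for_date(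
--     items: List[Dict[str, object]],
--     date_key: str,
-- ) -> Tuple[Optional[Dict[str, object]], List[Dict[str, object]]]:
--     # Locate-then-splice: find the index of the first match, then slice around it.
--     for i, item in enumerate(items):
--         if item.get("date") == date_key:
--             return item, items[:i] + items[i + 1:]
--     return None, list(items)
-- ===== Notes on version B (the rewrite author's own statement) =====
-- stated objective: simpler
-- what changed: Replaced the guarded accumulation loop (match flag plus rest list appended on every iteration) by locate-then-splice: scan only to the first matching index and return it with items[:i] + items[i+1:], or (None, list(items)) if absent.
import Mathlib
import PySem

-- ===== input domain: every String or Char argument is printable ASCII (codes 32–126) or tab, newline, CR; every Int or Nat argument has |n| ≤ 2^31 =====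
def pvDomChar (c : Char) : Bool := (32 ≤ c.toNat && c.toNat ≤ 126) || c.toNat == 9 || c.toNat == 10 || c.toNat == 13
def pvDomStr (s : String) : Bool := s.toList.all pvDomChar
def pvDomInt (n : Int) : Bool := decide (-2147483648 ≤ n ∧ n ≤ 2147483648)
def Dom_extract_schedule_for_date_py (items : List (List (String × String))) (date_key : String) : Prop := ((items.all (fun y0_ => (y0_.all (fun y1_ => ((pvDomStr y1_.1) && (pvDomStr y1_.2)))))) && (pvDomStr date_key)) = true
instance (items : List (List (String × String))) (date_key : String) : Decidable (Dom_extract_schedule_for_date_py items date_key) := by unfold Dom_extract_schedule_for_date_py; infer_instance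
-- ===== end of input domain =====

-- B replaces A's guarded accumulation loop by locate-then-splice (scan for the first
-- matching index, then slice around it); objective: simpler, same O(n) cost.

-- ===== PORT A =====
-- item.get("date") on the assoc-list dict = first-match lookup (List.lookup, exact here)
def extract_schedule_for_date_py (items : List (List (String × String))) (date_key : String) : (Option (List (String × String))) × (List (List (String × String))) :=
  items.foldl
    (fun st item =>
      if st.1 = none ∧ item.lookup "date" = some date_key then (some item, st.2)
      else (st.1, st.2 ++ [item]))
    (none, [])

-- ===== PORT B =====
-- the 'for i, item in enumerate(items): … return/…' loop of Source B, carrying the index i;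
-- items[:i] + items[i+1:] = take i ++ drop (i+1), exact since i ≥ 0 and in range
def pvLocate (items0 : List (List (String × String))) (date_key : String) : List (List (String × String)) → Nat → (Option (List (String × String))) × (List (List (String × String)))
  | [], _ => (none, items0)
  | item :: rest, i =>
    if item.lookup "date" = some date_key then
      (some item, items0.take i ++ items0.drop (i + 1))
    else
      pvLocate items0 date_key rest (i + 1)

def extract_schedule_for_date_py_alt (items : List (List (String × String))) (date_key : String) : (Option (List (String × String))) × (List (List (String × String))) :=
  pvLocate items date_key items 0

-- ===== PRECONDITION & SPEC =====
def Spec_extract_schedule_for_date_py (items : List (List (String × String))) (date_key : String) (out : (Option (List (String × String))) × (List (List (String × String)))) : Prop := out = extract_schedule_for_date_py_alt items date_key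
instance (items : List (List (String × String))) (date_key : String) (out : (Option (List (String × String))) × (List (List (String × String)))) : Decidable (Spec_extract_schedule_for_date_py items date_key out) := by unfold Spec_extract_schedule_for_date_py; infer_instance

-- ===== CLAIM (what is proved, stated in full; the proofs are below) =====
def Claim_equal_extract_schedule_for_date_py : Prop := ∀ (items : List (List (String × String))) (date_key : String), Dom_extract_schedule_for_date_py items date_key → Spec_extract_schedule_for_date_py items date_key (extract_schedule_for_date_py items date_key)

-- ===== LEMMAS AND PROOFS =====

-- reference recursion both ports are reduced to
def pvRef (date_key : String) : List (List (String × String)) → (Option (List (String × String))) × (List (List (String × String)))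
  | [] => (none, [])
  | item :: rest =>
    if item.lookup "date" = some date_key then (some item, rest)
    else ((pvRef date_key rest).1, item :: (pvRef date_key rest).2)

theorem pvFoldl_some (date_key : String) (l : List (List (String × String))) :
    ∀ (r : List (List (String × String))) (x : List (String × String)),
      l.foldl
        (fun st item =>
          if st.1 = none ∧ item.lookup "date" = some date_key then (some item, st.2)
          else (st.1, st.2 ++ [item]))
        (some x, r) = (some x, r ++ l) := by
  induction l with
  | nil => simp
  | cons item rest ih =>
      intro r x
      simp only [List.foldl_cons]
      rw [if_neg (by simp)]
      rw [ih]
      simp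

theorem pvFoldl_none (date_key : String) (l : List (List (String × String))) :
    ∀ (r : List (List (String × String))),
      l.foldl
        (fun st item =>
          if st.1 = none ∧ item.lookup "date" = some date_key then (some item, st.2)
          else (st.1, st.2 ++ [item]))
        (none, r) = ((pvRef date_key l).1, r ++ (pvRef date_key l).2) := by
  induction l with
  | nil => simp [pvRef]
  | cons item rest ih =>
      intro r
      simp only [List.foldl_cons, pvRef]
      by_cases h : item.lookup "date" = some date_key
      · rw [if_pos (by simp [h]), if_pos h, pvFoldl_some]
      · rw [if_neg (by simp [h]), if_neg h, ih]
        simp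

theorem pvLocate_ref (date_key : String) (l : List (List (String × String))) :
    ∀ (pre : List (List (String × String))),
      pvLocate (pre ++ l) date_key l pre.length
        = ((pvRef date_key l).1, pre ++ (pvRef date_key l).2) := by
  induction l with
  | nil => intro pre; simp [pvLocate, pvRef]
  | cons item rest ih =>
      intro pre
      simp only [pvLocate, pvRef]
      by_cases h : item.lookup "date" = some date_key
      · rw [if_pos h, if_pos h]
        have h1 : (pre ++ item :: rest).take pre.length = pre := by
          simp
        have h2 : (pre ++ item :: rest).drop (pre.length + 1) = rest := by
          have : pre ++ item :: rest = (pre ++ [item]) ++ rest := by simp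
          rw [this]
          have : pre.length + 1 = (pre ++ [item]).length := by simp
          rw [this, List.drop_left]
        rw [h1, h2]
      · rw [if_neg h, if_neg h]
        have : pre ++ item :: rest = (pre ++ [item]) ++ rest := by simp
        rw [this]
        have hlen : pre.length + 1 = (pre ++ [item]).length := by simp
        rw [hlen, ih (pre ++ [item])]
        simp

-- ===== VERDICT (by name: the statement is the Claim_ definition above) =====
theorem extract_schedule_for_date_py_spec : Claim_equal_extract_schedule_for_date_py := by
  intro items date_key _
  unfold Spec_extract_schedule_for_date_py extract_schedule_for_date_py extract_schedule_for_date_py_alt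
  rw [pvFoldl_none]
  have := pvLocate_ref date_key items []
  simpa using this.symm
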